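-- pv_equiv track=rewrite | github.com/glipR/glipR.github.io | compilation/markdown_utils.py | split_and_recombine
-- ===== SOURCE A (Python) =====
-- def split_and_recombine(blocks):
--     new_blocks = [[]]
--     for line in '\n\n'.join(blocks).split('\n'):
--         if line:
--             new_blocks[-1].append(line)
--         else:
--             new_blocks.append([])
--     return [
--         '\n'.join(s)
--         for s in new_blocks
--         if s
--     ]
-- ===== SOURCE B (Python) =====
-- def split_and_recombine(blocks):
--     lines = '\n\n'.join(blocks).split('\n')
--     out = []
--     i = 0
--     n = len(lines)
--     while i < n:
--         if not lines[i]: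
--             i += 1
--         else:
--             run = []
--             while i < n and lines[i]:
--                 run.append(lines[i])
--                 i += 1
--             out.append('\n'.join(run))
--     return out
-- ===== Notes on version B (the rewrite author's own statement) =====
-- stated objective: alternative
-- what changed: Replaces A's per-line branch that grows a nested list-of-groups and a second filter-and-join pass with a chunk-wise two-pointer scan over the line list: each outer step either skips one blank line or consumes a whole maximal run of non-empty lines in an inner loop and emits its join immediately.
import Mathlib
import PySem

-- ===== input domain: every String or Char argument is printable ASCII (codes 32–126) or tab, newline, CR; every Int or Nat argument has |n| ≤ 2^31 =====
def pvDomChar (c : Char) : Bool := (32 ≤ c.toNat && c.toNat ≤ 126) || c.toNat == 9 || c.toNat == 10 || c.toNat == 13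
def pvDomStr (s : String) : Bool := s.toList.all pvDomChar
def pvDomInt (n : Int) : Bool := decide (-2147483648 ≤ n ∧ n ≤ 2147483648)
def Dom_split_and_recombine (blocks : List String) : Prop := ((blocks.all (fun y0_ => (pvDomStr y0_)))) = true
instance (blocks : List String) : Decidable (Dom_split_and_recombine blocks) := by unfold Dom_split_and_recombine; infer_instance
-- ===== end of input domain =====

-- B replaces A's per-line branch into a nested list-of-groups plus a filter/join pass with a chunk-wise two-pointer scan (skip a blank or consume a whole run and emit it); alternative decomposition, same cost.

-- ===== PORT A =====
-- sep "\n" is a nonempty literal, so split? is always `some`; .getD [] only unwraps it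
-- loop body: if line: new_blocks[-1].append(line) else: new_blocks.append([])
def aStep (nb : List (List String)) (line : String) : List (List String) :=
  if line ≠ "" then nb.dropLast ++ [nb.getLastD [] ++ [line]]
  else nb ++ [[]]

def split_and_recombine (blocks : List String) : List String :=
  let new_blocks := ((PySem.Str.split? (PySem.Str.join "\n\n" blocks) "\n").getD []).foldl aStep [[]]
  (new_blocks.filter (fun s => s ≠ [])).map (fun s => PySem.Str.join "\n" s)

-- ===== PORT B =====
-- outer while loop over the remaining lines, carrying `out`; the inner
-- `while i < n and lines[i]` collect loop is ported as takeWhile (the run)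
-- and dropWhile (the advance of i past the run)
def regroupGo : List String → List String → List String
  | [], out => out
  | l :: rest, out =>
    if l = "" then regroupGo rest out
    else
      regroupGo ((l :: rest).dropWhile (fun x => x ≠ ""))
        (out ++ [PySem.Str.join "\n" ((l :: rest).takeWhile (fun x => x ≠ ""))])
termination_by lines _ => lines.length
decreasing_by
  · simp
  · simp only [List.dropWhile]
    have h : (decide (l ≠ "")) = true := by simp_all
    rw [h]
    simp only [List.length_cons]
    exact Nat.lt_succ_of_le (List.length_dropWhile_le _ _)

def split_and_recombine_alt (blocks : List String) : List String :=
  regroupGo ((PySem.Str.split? (PySem.Str.join "\n\n" blocks) "\n").getD []) []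

-- ===== PRECONDITION & SPEC =====
def Spec_split_and_recombine (blocks : List String) (out : List String) : Prop := out = split_and_recombine_alt blocks
instance (blocks : List String) (out : List String) : Decidable (Spec_split_and_recombine blocks out) := by unfold Spec_split_and_recombine; infer_instance

-- ===== CLAIM (what is proved, stated in full; the proofs are below) =====
def Claim_equal_split_and_recombine : Prop := ∀ (blocks : List String), Dom_split_and_recombine blocks → Spec_split_and_recombine blocks (split_and_recombine blocks)

-- ===== LEMMAS AND PROOFS =====

-- facts about B's run predicate
lemma takeWhile_all_ne (g : List String) (hg : ∀ x ∈ g, x ≠ "") :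
    g.takeWhile (fun x => x ≠ "") = g := by
  simp [List.takeWhile_eq_self_iff]; exact hg

lemma dropWhile_all_ne (g r : List String) (hg : ∀ x ∈ g, x ≠ "") :
    (g ++ r).dropWhile (fun x => x ≠ "") = r.dropWhile (fun x => x ≠ "") := by
  rw [List.dropWhile_append]
  simp [List.dropWhile_eq_nil_iff]
  intro h; exact absurd rfl (hg _ h)

-- one outer-loop step of B on a non-empty head line
lemma regroupGo_step_run (out : List String) (l : String) (rest : List String)
    (hl : l ≠ "") :
    regroupGo (l :: rest) out
      = regroupGo (rest.dropWhile (fun x => x ≠ ""))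
          (out ++ [PySem.Str.join "\n" (l :: rest.takeWhile (fun x => x ≠ ""))]) := by
  rw [regroupGo]
  have h1 : (l :: rest).takeWhile (fun x => x ≠ "") = l :: rest.takeWhile (fun x => x ≠ "") := by
    simp [hl]
  have h2 : (l :: rest).dropWhile (fun x => x ≠ "") = rest.dropWhile (fun x => x ≠ "") := by
    simp [hl]
  rw [if_neg hl, h1, h2]

-- one outer-loop step of B on a blank head line
lemma regroupGo_step_blank (out rest : List String) :
    regroupGo ("" :: rest) out = regroupGo rest out := by
  rw [regroupGo]; simp

-- the accumulator of B's outer loop commutes out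
lemma regroupGo_acc : ∀ (n : Nat) (lines : List String), lines.length ≤ n →
    ∀ acc, regroupGo lines acc = acc ++ regroupGo lines [] := by
  intro n
  induction n with
  | zero =>
    intro lines hn acc
    have : lines = [] := List.eq_nil_of_length_eq_zero (Nat.le_zero.mp hn)
    subst this; simp [regroupGo]
  | succ n ih =>
    intro lines hn acc
    match lines with
    | [] => simp [regroupGo]
    | l :: rest =>
      have hrest : rest.length ≤ n := by simpa using hn
      by_cases hl : l = ""
      · subst hl
        rw [regroupGo_step_blank, regroupGo_step_blank]
        exact ih rest hrest acc
      · have hdrop : (rest.dropWhile (fun x => x ≠ "")).length ≤ n :=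
          Nat.le_trans (List.length_dropWhile_le _ _) hrest
        rw [regroupGo_step_run acc l rest hl, regroupGo_step_run [] l rest hl,
            ih _ hdrop (acc ++ [PySem.Str.join "\n" (l :: rest.takeWhile (fun x => x ≠ ""))]),
            ih _ hdrop ([] ++ [PySem.Str.join "\n" (l :: rest.takeWhile (fun x => x ≠ ""))])]
        simp

-- B on a finished all-non-empty group g followed by a blank line: emit g, go on
lemma regroupGo_emit (g rest : List String) (hg : ∀ x ∈ g, x ≠ "") :
    regroupGo (g ++ "" :: rest) []
      = (if g = [] then [] else [PySem.Str.join "\n" g]) ++ regroupGo rest [] := by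
  match g with
  | [] => simp [regroupGo_step_blank]
  | h :: t =>
    have ht : ∀ x ∈ t, x ≠ "" := fun x hx => hg x (by simp [hx])
    rw [show (h :: t) ++ "" :: rest = h :: (t ++ "" :: rest) from rfl,
        regroupGo_step_run [] h (t ++ "" :: rest) (hg h (by simp))]
    rw [show (t ++ "" :: rest).takeWhile (fun x => x ≠ "") = t from by
          rw [List.takeWhile_append_of_pos (by simpa using ht)]
          simp]
    rw [dropWhile_all_ne t ("" :: rest) ht]
    rw [show ("" :: rest).dropWhile (fun x => x ≠ "") = "" :: rest from by
          simp]
    rw [regroupGo_step_blank]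
    rw [regroupGo_acc rest.length rest (Nat.le_refl _)]
    simp

-- the central invariant: A's fold from state (init ++ [g]) with g the current
-- all-non-empty partial group produces init's finished groups followed by what
-- B's chunk scan produces on g's lines prepended to the remaining lines
lemma inv (lines : List String) : ∀ (init : List (List String)) (g : List String),
    (∀ x ∈ g, x ≠ "") →
    ((List.foldl aStep (init ++ [g]) lines).filter (fun s => s ≠ [])).map
        (fun s => PySem.Str.join "\n" s)
      = ((init.filter (fun s => s ≠ [])).map (fun s => PySem.Str.join "\n" s))
          ++ regroupGo (g ++ lines) [] := by
  induction lines with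
  | nil =>
    intro init g hg
    match g with
    | [] => simp [regroupGo, List.filter_append]
    | h :: t =>
      have ht : ∀ x ∈ t, x ≠ "" := fun x hx => hg x (by simp [hx])
      rw [List.foldl_nil, List.append_nil,
          regroupGo_step_run [] h t (hg h (by simp)),
          takeWhile_all_ne t ht,
          show t.dropWhile (fun x => x ≠ "") = [] from by
            simpa using dropWhile_all_ne t [] ht]
      simp [regroupGo, List.filter_append]
  | cons line rest ih =>
    intro init g hg
    by_cases hline : line = ""
    · subst hline
      have ha : aStep (init ++ [g]) "" = (init ++ [g]) ++ [[]] := by simp [aStep]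
      rw [List.foldl_cons, ha, ih (init ++ [g]) [] (by simp),
          regroupGo_emit g rest hg]
      by_cases hgnil : g = []
      · simp [hgnil, List.filter_append]
      · simp [hgnil, List.filter_append]
    · have ha : aStep (init ++ [g]) line = init ++ [g ++ [line]] := by
        simp [aStep, hline]
      rw [List.foldl_cons, ha, ih init (g ++ [line])
          (by intro x hx; rcases List.mem_append.mp hx with h | h
              · exact hg x h
              · simpa using (List.mem_singleton.mp h ▸ hline))]
      simp

-- ===== VERDICT (by name: the statement is the Claim_ definition above) =====
theorem split_and_recombine_spec : Claim_equal_split_and_recombine := by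
  intro blocks _
  unfold Spec_split_and_recombine split_and_recombine split_and_recombine_alt
  have h := inv ((PySem.Str.split? (PySem.Str.join "\n\n" blocks) "\n").getD []) [] [] (by simp)
  simpa using h
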